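-- pv_equiv track=rewrite | github.com/gramoscelli/notes_processing | simplify_css.py | fusionar_reglas
-- ===== SOURCE A (Python) =====
-- from collections import defaultdict
--
-- def fusionar_reglas(reglas):
--     reglas_por_selector = defaultdict(list)
--
--     # recolectar propiedades por selector
--     for selector, props in reglas:
--         for linea in props.split(';'):
--             linea = linea.strip()
--             if not linea:
--                 continue
--             if ':' not in linea:
--                 continue
--             propiedad, valor = map(str.strip, linea.split(':', 1))
--             reglas_por_selector[selector].append((propiedad, valor))
--
--     # aplicar la cascada: últimas definiciones prevalecen, salvo !important
--     reglas_finales = {}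
--     for selector, pares in reglas_por_selector.items():
--         propiedades = {}
--         for prop, val in pares:
--             es_important = val.endswith('!important')
--             if prop not in propiedades:
--                 propiedades[prop] = (val, es_important)
--             else:
--                 _, ya_important = propiedades[prop]
--                 if es_important or not ya_important:
--                     propiedades[prop] = (val, es_important)
--         reglas_finales[selector] = propiedades
--
--     resultado = []
--     for selector, props in reglas_finales.items():
--         cuerpo = '; '.join(f"{k}: {v}" for k, (v, _) in props.items())
--         resultado.append(f"{selector} {{{cuerpo};}}")
--     return '\n\n'.join(resultado)
-- ===== SOURCE B (Python) =====
-- def fusionar_reglas(reglas):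
--     # flatten once into (selector, prop, val) triples, in source order
--     items = []
--     for selector, props in reglas:
--         for linea in props.split(';'):
--             linea = linea.strip()
--             if ':' in linea:
--                 p, v = linea.split(':', 1)
--                 items.append((selector, p.strip(), v.strip()))
--
--     # winner for a (selector, prop): last !important value if any, else last value
--     def ganador(sel, prop):
--         vals = [v for (s, p, v) in items if s == sel and p == prop]
--         imps = [v for v in vals if v.endswith('!important')]
--         return (imps if imps else vals)[-1]
--
--     bloques = []
--     for sel in dict.fromkeys(s for (s, _, _) in items):
--         props = dict.fromkeys(p for (s, p, _) in items if s == sel)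
--         cuerpo = '; '.join(f"{p}: {ganador(sel, p)}" for p in props)
--         bloques.append(f"{sel} {{{cuerpo};}}")
--     return '\n\n'.join(bloques)
-- ===== Notes on version B (the rewrite author's own statement) =====
-- stated objective: simpler
-- what changed: Replaces the two stateful dict-building cascade passes by a declarative formulation: flatten all rules into (selector, prop, val) triples once, then for each first-occurrence selector/property pick the winner directly as 'last !important value if any, else last value', which is what the cascade state machine computes.
import Mathlib
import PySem

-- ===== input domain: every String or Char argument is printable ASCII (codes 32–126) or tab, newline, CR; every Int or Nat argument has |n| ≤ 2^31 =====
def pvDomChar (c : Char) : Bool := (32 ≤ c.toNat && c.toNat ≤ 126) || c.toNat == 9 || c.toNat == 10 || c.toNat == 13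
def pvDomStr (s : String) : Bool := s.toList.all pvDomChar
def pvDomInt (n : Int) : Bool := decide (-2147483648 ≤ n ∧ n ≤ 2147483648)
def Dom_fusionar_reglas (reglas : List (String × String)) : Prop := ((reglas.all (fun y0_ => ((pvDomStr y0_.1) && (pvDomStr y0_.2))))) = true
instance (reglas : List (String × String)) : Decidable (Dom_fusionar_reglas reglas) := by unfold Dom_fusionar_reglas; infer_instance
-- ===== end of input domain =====

-- B replaces A's two stateful dict-building cascade passes by a declarative formulation
-- (flatten once, then pick each property's winner as "last !important value, else last value"); objective: simpler.

-- ===== PORT A =====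
def fusionar_reglas (reglas : List (String × String)) : String :=
  -- reglas_por_selector = defaultdict(list); recolectar propiedades por selector
  let reglas_por_selector : PySem.Dict String (List (String × String)) :=
    reglas.foldl (fun d sv =>
      ((PySem.Str.split? sv.2 ";").getD []).foldl (fun d linea0 =>
        let linea := PySem.Str.strip linea0
        if linea = "" then d
        else if !(PySem.Str.isIn ":" linea) then d
        else
          -- linea.split(':', 1) has exactly two parts here (':' occurs in linea)
          let parts := (PySem.Str.splitMax? linea ":" 1).getD []
          d.modify sv.1 [] (· ++ [(PySem.Str.strip (parts.getD 0 ""), PySem.Str.strip (parts.getD 1 ""))]))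
        d) PySem.Dict.empty
  -- aplicar la cascada
  let reglas_finales : PySem.Dict String (PySem.Dict String (String × Bool)) :=
    reglas_por_selector.items.foldl (fun rf sp =>
      let propiedades : PySem.Dict String (String × Bool) :=
        sp.2.foldl (fun props pv =>
          let es_important := PySem.Str.endswith pv.2 "!important"
          match props.get? pv.1 with
          | none => props.insert pv.1 (pv.2, es_important)
          | some q =>
            if es_important || !q.2 then props.insert pv.1 (pv.2, es_important)
            else props) PySem.Dict.empty
      rf.insert sp.1 propiedades) PySem.Dict.empty
  let resultado := reglas_finales.items.map (fun sp =>
    let cuerpo := PySem.Str.join "; " (sp.2.items.map (fun kv => kv.1 ++ ": " ++ kv.2.1))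
    sp.1 ++ " {" ++ cuerpo ++ ";}")
  PySem.Str.join "\n\n" resultado

-- ===== PORT B =====
def fusionar_reglas_alt (reglas : List (String × String)) : String :=
  -- flatten once into (selector, prop, val) triples, in source order
  let items : List (String × String × String) :=
    reglas.foldl (fun acc sv =>
      ((PySem.Str.split? sv.2 ";").getD []).foldl (fun acc linea0 =>
        let linea := PySem.Str.strip linea0
        if PySem.Str.isIn ":" linea then
          let parts := (PySem.Str.splitMax? linea ":" 1).getD []
          acc ++ [(sv.1, PySem.Str.strip (parts.getD 0 ""), PySem.Str.strip (parts.getD 1 ""))]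
        else acc) acc) []
  -- winner for (sel, prop): last !important value if any, else last value
  let ganador := fun (sel prop : String) =>
    let vals := (items.filter (fun t => t.1 == sel && t.2.1 == prop)).map (fun t => t.2.2)
    let imps := vals.filter (fun v => PySem.Str.endswith v "!important")
    -- '(imps if imps else vals)[-1]': getLastD is exact here, vals is nonempty at every call site
    (if imps.isEmpty then vals else imps).getLastD ""
  let bloques := (PySem.List.dedup (items.map (·.1))).map (fun sel =>
    let props := PySem.List.dedup ((items.filter (fun t => t.1 == sel)).map (fun t => t.2.1))
    let cuerpo := PySem.Str.join "; " (props.map (fun p => p ++ ": " ++ ganador sel p))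
    sel ++ " {" ++ cuerpo ++ ";}")
  PySem.Str.join "\n\n" bloques

-- ===== PRECONDITION & SPEC =====
def Spec_fusionar_reglas (reglas : List (String × String)) (out : String) : Prop := out = fusionar_reglas_alt reglas
instance (reglas : List (String × String)) (out : String) : Decidable (Spec_fusionar_reglas reglas out) := by unfold Spec_fusionar_reglas; infer_instance

-- ===== CLAIM (what is proved, stated in full; the proofs are below) =====
def Claim_equal_fusionar_reglas : Prop := ∀ (reglas : List (String × String)), Dom_fusionar_reglas reglas → Spec_fusionar_reglas reglas (fusionar_reglas reglas)

-- ===== LEMMAS AND PROOFS =====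

-- parsing one line of a props string: `some (prop, val)` iff the line survives both programs' guards
def pvParseLine? (linea0 : String) : Option (String × String) :=
  let linea := PySem.Str.strip linea0
  if PySem.Str.isIn ":" linea then
    let parts := (PySem.Str.splitMax? linea ":" 1).getD []
    some (PySem.Str.strip (parts.getD 0 ""), PySem.Str.strip (parts.getD 1 ""))
  else none

-- the flattened (selector, prop, val) triples both programs effectively work on
def pvItems (reglas : List (String × String)) : List (String × String × String) :=
  reglas.flatMap (fun sv =>
    ((PySem.Str.split? sv.2 ";").getD []).filterMap
      (fun l => (pvParseLine? l).map (fun pv => (sv.1, pv.1, pv.2))))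

def pvImp (v : String) : Bool := PySem.Str.endswith v "!important"

-- the cascade winner after starting state (w, pvImp w)
def pvT (w : String) (vs : List String) : String × Bool :=
  match (vs.filter pvImp).getLast? with
  | some u => (u, true)
  | none => if pvImp w then (w, true) else (vs.getLastD w, false)

-- one step of A's cascade loop (definitionally the lambda in port A)
def pvCascStep (props : PySem.Dict String (String × Bool)) (pv : String × String) :
    PySem.Dict String (String × Bool) :=
  let es_important := PySem.Str.endswith pv.2 "!important"
  match props.get? pv.1 with
  | none => props.insert pv.1 (pv.2, es_important)
  | some q => if es_important || !q.2 then props.insert pv.1 (pv.2, es_important) else props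

-- the cascade rule on a single stored state
def pvCombine (o : Option (String × Bool)) (v : String) : String × Bool :=
  match o with
  | none => (v, pvImp v)
  | some q => if pvImp v || !q.2 then (v, pvImp v) else q

-- the property values listed for key p, and the winning value among them
def pvVals (L : List (String × String)) (p : String) : List String :=
  (L.filter (fun pv => pv.1 == p)).map (·.2)

def pvTof (vals : List String) : String :=
  match vals with
  | [] => ""
  | v0 :: vs => (pvT v0 vs).1

def pvTofPair (vals : List String) : String × Bool :=
  match vals with
  | [] => ("", false)
  | v0 :: vs => pvT v0 vs

-- the common normal form both ports are reduced to
def pvRender (reglas : List (String × String)) : String :=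
  let items := pvItems reglas
  PySem.Str.join "\n\n" ((PySem.Set.ofList (items.map (·.1))).map (fun sel =>
    let L := (items.filter (fun t => t.1 == sel)).map (·.2)
    sel ++ " {" ++ PySem.Str.join "; " ((PySem.Set.ofList (L.map (·.1))).map (fun p =>
      p ++ ": " ++ pvTof (pvVals L p))) ++ ";}"))

lemma pv_filterMap_if {α β : Type} (p : α → Bool) (f : α → β) (l : List α) :
    (l.filterMap (fun a => if p a then some (f a) else none)) = (l.filter p).map f := by
  induction l with
  | nil => rfl
  | cons x xs ih => by_cases h : p x <;> simp [h, ih]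

lemma pv_items_alt (reglas : List (String × String)) :
    (reglas.foldl (fun acc sv =>
      ((PySem.Str.split? sv.2 ";").getD []).foldl (fun acc linea0 =>
        let linea := PySem.Str.strip linea0
        if PySem.Str.isIn ":" linea then
          let parts := (PySem.Str.splitMax? linea ":" 1).getD []
          acc ++ [(sv.1, PySem.Str.strip (parts.getD 0 ""), PySem.Str.strip (parts.getD 1 ""))]
        else acc) acc) ([] : List (String × String × String))) = pvItems reglas := by
  have hstep : ∀ (sv : String × String) (acc : List (String × String × String)),
      ((PySem.Str.split? sv.2 ";").getD []).foldl (fun acc linea0 =>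
        let linea := PySem.Str.strip linea0
        if PySem.Str.isIn ":" linea then
          let parts := (PySem.Str.splitMax? linea ":" 1).getD []
          acc ++ [(sv.1, PySem.Str.strip (parts.getD 0 ""), PySem.Str.strip (parts.getD 1 ""))]
        else acc) acc
      = acc ++ ((PySem.Str.split? sv.2 ";").getD []).filterMap
          (fun l => (pvParseLine? l).map (fun pv => (sv.1, pv.1, pv.2))) := by
    intro sv acc
    rw [PySem.List.foldl_append_if (fun l => PySem.Str.isIn ":" (PySem.Str.strip l))
      (fun l => (sv.1, PySem.Str.strip (((PySem.Str.splitMax? (PySem.Str.strip l) ":" 1).getD []).getD 0 ""),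
                 PySem.Str.strip (((PySem.Str.splitMax? (PySem.Str.strip l) ":" 1).getD []).getD 1 "")))]
    congr 1
    rw [← pv_filterMap_if]
    apply List.filterMap_congr
    intro l _
    unfold pvParseLine?
    by_cases h : PySem.Str.isIn ":" (PySem.Str.strip l)
    · simp only [h, if_pos, Option.map_some]
    · simp only [h, Bool.false_eq_true, if_neg, not_false_iff, Option.map_none]
  calc (reglas.foldl (fun acc sv =>
      ((PySem.Str.split? sv.2 ";").getD []).foldl (fun acc linea0 =>
        let linea := PySem.Str.strip linea0
        if PySem.Str.isIn ":" linea then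
          let parts := (PySem.Str.splitMax? linea ":" 1).getD []
          acc ++ [(sv.1, PySem.Str.strip (parts.getD 0 ""), PySem.Str.strip (parts.getD 1 ""))]
        else acc) acc) ([] : List (String × String × String)))
      = reglas.foldl (fun acc sv => acc ++ ((PySem.Str.split? sv.2 ";").getD []).filterMap
          (fun l => (pvParseLine? l).map (fun pv => (sv.1, pv.1, pv.2)))) [] := by
        exact PySem.List.foldl_congr_mem _ _ _ _ (fun acc sv _ => hstep sv acc)
    _ = pvItems reglas := by
        rw [PySem.List.foldl_append_eq_flatMap]; rfl

lemma pv_phase1 (reglas : List (String × String)) :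
    (reglas.foldl (fun d sv =>
      ((PySem.Str.split? sv.2 ";").getD []).foldl (fun d linea0 =>
        let linea := PySem.Str.strip linea0
        if linea = "" then d
        else if !(PySem.Str.isIn ":" linea) then d
        else
          let parts := (PySem.Str.splitMax? linea ":" 1).getD []
          d.modify sv.1 [] (· ++ [(PySem.Str.strip (parts.getD 0 ""), PySem.Str.strip (parts.getD 1 ""))]))
        d) (PySem.Dict.empty : PySem.Dict String (List (String × String)))) =
    (pvItems reglas).foldl (fun d t => d.modify t.1 [] (· ++ [t.2])) PySem.Dict.empty := by
  unfold pvItems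
  rw [List.foldl_flatMap]
  apply PySem.List.foldl_congr_mem
  intro d sv _
  rw [List.foldl_filterMap]
  apply PySem.List.foldl_congr_mem
  intro d' l _
  show (let linea := PySem.Str.strip l;
        if linea = "" then d'
        else if !(PySem.Str.isIn ":" linea) then d'
        else
          let parts := (PySem.Str.splitMax? linea ":" 1).getD []
          d'.modify sv.1 [] (· ++ [(PySem.Str.strip (parts.getD 0 ""), PySem.Str.strip (parts.getD 1 ""))]))
      = _
  by_cases he : PySem.Str.strip l = ""
  · rw [if_pos he]
    unfold pvParseLine?
    dsimp only
    rw [he, if_neg (show ¬ PySem.Str.isIn ":" "" = true by decide)]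
    rfl
  · rw [if_neg he]
    by_cases hc : PySem.Str.isIn ":" (PySem.Str.strip l) = true
    · rw [hc, if_neg (show ¬ (!true) = true by decide)]
      unfold pvParseLine?
      dsimp only
      rw [if_pos hc]
      rfl
    · have hc' : PySem.Str.isIn ":" (PySem.Str.strip l) = false := by simpa using hc
      rw [hc', if_pos (show (!false) = true by decide)]
      unfold pvParseLine?
      dsimp only
      rw [if_neg hc]
      rfl

lemma pv_casc_step_get? (d : PySem.Dict String (String × Bool)) (pv : String × String) (p : String) :
    (pvCascStep d pv).get? p =
      if p = pv.1 then some (pvCombine (d.get? pv.1) pv.2) else d.get? p := by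
  unfold pvCascStep pvCombine pvImp
  cases hd : d.get? pv.1 with
  | none =>
    dsimp only
    by_cases hp : p = pv.1
    · subst hp; rw [if_pos rfl, PySem.Dict.get?_insert_self]
    · rw [if_neg hp, PySem.Dict.get?_insert_of_ne _ _ hp]
  | some q =>
    dsimp only
    by_cases hc : (PySem.Str.endswith pv.2 "!important" || !q.2) = true
    · rw [if_pos hc]
      by_cases hp : p = pv.1
      · subst hp; rw [if_pos rfl, PySem.Dict.get?_insert_self, if_pos (by simpa using hc)]
      · rw [if_neg hp, PySem.Dict.get?_insert_of_ne _ _ hp]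
    · rw [if_neg hc]
      by_cases hp : p = pv.1
      · subst hp; rw [if_pos rfl, hd, if_neg (by simpa using hc)]
      · rw [if_neg hp]

lemma pv_casc_get? (L : List (String × String)) (d : PySem.Dict String (String × Bool)) (p : String) :
    (L.foldl pvCascStep d).get? p =
      ((L.filter (fun pv => pv.1 == p)).map (·.2)).foldl (fun o v => some (pvCombine o v)) (d.get? p) := by
  induction L generalizing d with
  | nil => rfl
  | cons pv L ih =>
    simp only [List.foldl_cons, List.filter_cons]
    by_cases hp : pv.1 = p
    · simp only [hp, beq_self_eq_true, if_pos, List.map_cons, List.foldl_cons]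
      rw [ih, pv_casc_step_get?, if_pos hp.symm, hp]
    · have hbeq : (pv.1 == p) = false := by simpa using hp
      simp only [hbeq, Bool.false_eq_true, if_neg, not_false_iff]
      rw [ih, pv_casc_step_get?, if_neg (fun h => hp h.symm)]

lemma pv_casc_step_keys (d : PySem.Dict String (String × Bool)) (pv : String × String) :
    (pvCascStep d pv).keys = PySem.Set.add d.keys pv.1 := by
  have hck : d.contains pv.1 = PySem.Set.contains d.keys pv.1 := by
    rw [PySem.Dict.contains_eq_decide_mem_keys]
    rw [PySem.Set.contains_eq_listContains]
    simp
  unfold pvCascStep PySem.Set.add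
  cases hd : d.get? pv.1 with
  | none =>
    dsimp only
    have hcon : d.contains pv.1 = false := (PySem.Dict.get?_eq_none_iff_contains d pv.1).mp hd
    rw [PySem.Dict.keys_insert_of_not_contains _ _ hcon,
      if_neg (show ¬ PySem.Set.contains d.keys pv.1 = true by rw [← hck]; simp [hcon])]
  | some q =>
    dsimp only
    have hcon : d.contains pv.1 = true := by
      rw [PySem.Dict.contains_eq_isSome_get?, hd]; rfl
    by_cases hc : (PySem.Str.endswith pv.2 "!important" || !q.2) = true
    · rw [if_pos hc, PySem.Dict.keys_insert_of_contains _ _ hcon,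
        if_pos (show PySem.Set.contains d.keys pv.1 = true by rw [← hck]; exact hcon)]
    · rw [if_neg hc, if_pos (show PySem.Set.contains d.keys pv.1 = true by rw [← hck]; exact hcon)]

lemma pv_casc_keys (L : List (String × String)) (d : PySem.Dict String (String × Bool)) :
    (L.foldl pvCascStep d).keys = PySem.Set.update d.keys (L.map (·.1)) := by
  induction L generalizing d with
  | nil => rfl
  | cons pv L ih =>
    simp only [List.foldl_cons, List.map_cons, PySem.Set.update_cons]
    rw [ih, pv_casc_step_keys]

lemma pv_T_cons (w v : String) (vs : List String) (h : pvImp v || !pvImp w) :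
    pvT w (v :: vs) = pvT v vs := by
  unfold pvT
  by_cases hv : pvImp v
  · simp only [List.filter_cons, hv, if_pos]
    cases hfl : (vs.filter pvImp).getLast? with
    | some u => simp [List.getLast?_cons, hfl]
    | none => simp [List.getLast?_cons, hfl]
  · have hw : pvImp w = false := by revert h; cases hpw : pvImp w <;> simp [hv]
    simp only [List.filter_cons, hv, if_neg, Bool.false_eq_true, not_false_iff]
    cases hfl : (vs.filter pvImp).getLast? with
    | some u => simp
    | none => simp [hw, List.getLast?_cons, List.getLastD_eq_getLast?]

lemma pv_G_some (vs : List String) (w : String) :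
    vs.foldl (fun o v => some (pvCombine o v)) (some (w, pvImp w)) = some (pvT w vs) := by
  induction vs generalizing w with
  | nil => cases hw : pvImp w <;> simp [pvT, hw]
  | cons v vs ih =>
    simp only [List.foldl_cons]
    by_cases hc : (pvImp v || !pvImp w) = true
    · have : pvCombine (some (w, pvImp w)) v = (v, pvImp v) := by simp [pvCombine, hc]
      rw [this, ih, pv_T_cons w v vs hc]
    · have hv : pvImp v = false := by revert hc; cases pvImp v <;> simp
      have hw : pvImp w = true := by revert hc; cases pvImp w <;> simp
      have : pvCombine (some (w, pvImp w)) v = (w, pvImp w) := by simp [pvCombine, hv, hw]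
      rw [this, ih]
      unfold pvT
      simp [hv, hw]

lemma pv_ganador (v0 : String) (vs : List String) :
    (if ((v0 :: vs).filter pvImp).isEmpty then v0 :: vs else (v0 :: vs).filter pvImp).getLastD ""
      = (pvT v0 vs).1 := by
  unfold pvT
  by_cases hv : pvImp v0
  · simp only [List.filter_cons, hv, if_pos, List.isEmpty_cons, if_neg, Bool.false_eq_true, not_false_iff]
    cases hfl : (vs.filter pvImp).getLast? with
    | some u => simp [List.getLastD_eq_getLast?, List.getLast?_cons, hfl]
    | none => simp [List.getLastD_eq_getLast?, List.getLast?_cons, hfl]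
  · simp only [List.filter_cons, hv]
    cases hfl : (vs.filter pvImp).getLast? with
    | some u =>
      have hne : (vs.filter pvImp).isEmpty = false := by
        cases hE : vs.filter pvImp <;> simp_all
      simp [Bool.false_eq_true, hne, List.getLastD_eq_getLast?, hfl]
    | none =>
      have hE : vs.filter pvImp = [] := by simpa [List.getLast?_eq_none_iff] using hfl
      simp [hE, List.getLast?_cons, List.getLastD_eq_getLast?]

lemma pv_vals_triples (items : List (String × String × String)) (sel p : String) :
    (items.filter (fun t => t.1 == sel && t.2.1 == p)).map (fun t => t.2.2)
      = pvVals ((items.filter (fun t => t.1 == sel)).map (fun t => t.2)) p := by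
  unfold pvVals
  rw [List.filter_map, List.map_map, List.filter_filter]
  congr 1
  apply List.filter_congr
  intro t _
  simp [Bool.and_comm]

lemma pv_vals_ne_nil {L : List (String × String)} {p : String}
    (hp : p ∈ PySem.Set.ofList (L.map (·.1))) : pvVals L p ≠ [] := by
  rw [PySem.Set.mem_ofList] at hp
  obtain ⟨pv, hmem, hfst⟩ := List.mem_map.mp hp
  apply List.ne_nil_of_mem (a := pv.2)
  exact List.mem_map_of_mem (List.mem_filter.mpr ⟨hmem, by simp [hfst]⟩)

lemma pv_d1_items (items : List (String × String × String)) :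
    (items.foldl (fun d t => d.modify t.1 [] (· ++ [t.2])) PySem.Dict.empty).items
      = (PySem.Set.ofList (items.map (·.1))).map
          (fun sel => (sel, (items.filter (fun t => t.1 == sel)).map (fun t => t.2))) := by
  have hk := PySem.Dict.keys_foldl_modify_key items (fun t : String × String × String => t.1)
    ([] : List (String × String)) (fun _ t => (· ++ [t.2])) PySem.Dict.empty
  rw [PySem.Dict.keys_empty, PySem.Set.update_nil_left] at hk
  have hnd : (items.foldl (fun d t => d.modify t.1 [] (· ++ [t.2])) PySem.Dict.empty).keys.Nodup := by
    rw [hk]; exact PySem.Set.nodup_ofList _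
  rw [PySem.Dict.items_eq_map_keys _ hnd [], hk]
  apply List.map_eq_map_iff.mpr
  intro sel _
  congr 1
  have hg := PySem.Dict.getD_foldl_modify_append items PySem.Dict.empty sel
  rw [PySem.Dict.getD_empty] at hg
  rw [hg, List.nil_append]

lemma pv_casc_items (L : List (String × String)) :
    (L.foldl pvCascStep PySem.Dict.empty).items
      = (PySem.Set.ofList (L.map (·.1))).map (fun p => (p, pvTofPair (pvVals L p))) := by
  have hkC : (L.foldl pvCascStep PySem.Dict.empty).keys = PySem.Set.ofList (L.map (·.1)) := by
    rw [pv_casc_keys, PySem.Dict.keys_empty, PySem.Set.update_nil_left]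
  have hndC : (L.foldl pvCascStep PySem.Dict.empty).keys.Nodup := by
    rw [hkC]; exact PySem.Set.nodup_ofList _
  rw [PySem.Dict.items_eq_map_keys _ hndC ("", false), hkC]
  apply List.map_eq_map_iff.mpr
  intro p hp
  congr 1
  have hg := pv_casc_get? L PySem.Dict.empty p
  rw [PySem.Dict.get?_empty] at hg
  have hne := pv_vals_ne_nil (L := L) (p := p) hp
  cases hv : pvVals L p with
  | nil => exact absurd hv hne
  | cons v0 vs =>
    have hv' := hv
    unfold pvVals at hv'
    rw [hv'] at hg
    have hsome : (L.foldl pvCascStep PySem.Dict.empty).get? p = some (pvT v0 vs) := by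
      rw [hg, List.foldl_cons]
      exact pv_G_some vs v0
    rw [PySem.Dict.getD_of_get?_eq_some _ _ hsome]
    rfl

lemma pv_A_eq_render (reglas : List (String × String)) :
    fusionar_reglas reglas = pvRender reglas := by
  unfold fusionar_reglas pvRender
  rw [pv_phase1]
  dsimp only
  have hstep : (fun (rf : PySem.Dict String (PySem.Dict String (String × Bool)))
      (sp : String × List (String × String)) =>
      let propiedades : PySem.Dict String (String × Bool) :=
        sp.2.foldl (fun props pv =>
          let es_important := PySem.Str.endswith pv.2 "!important"
          match props.get? pv.1 with
          | none => props.insert pv.1 (pv.2, es_important)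
          | some q =>
            if es_important || !q.2 then props.insert pv.1 (pv.2, es_important)
            else props) PySem.Dict.empty
      rf.insert sp.1 propiedades)
      = (fun rf sp => rf.insert sp.1 (sp.2.foldl pvCascStep PySem.Dict.empty)) := rfl
  rw [hstep]
  have hnd : ((((pvItems reglas).foldl (fun d t => d.modify t.1 [] (· ++ [t.2]))
      PySem.Dict.empty).items).map (·.1)).Nodup := by
    show (((pvItems reglas).foldl (fun d t => d.modify t.1 [] (· ++ [t.2]))
      PySem.Dict.empty).keys).Nodup
    exact PySem.Dict.nodup_keys_foldl_modify_key _ _ _ _ _ PySem.Dict.nodup_keys_empty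
  have hfr := PySem.Dict.items_foldl_insert_fresh
    (((pvItems reglas).foldl (fun d t => d.modify t.1 [] (· ++ [t.2])) PySem.Dict.empty).items)
    (fun sp => sp.1) (fun sp => sp.2.foldl pvCascStep PySem.Dict.empty) PySem.Dict.empty
    (fun a _ => PySem.Dict.contains_empty _) hnd
  beta_reduce at hfr
  rw [hfr]
  rw [pv_d1_items]
  have hemp : (PySem.Dict.empty : PySem.Dict String (PySem.Dict String (String × Bool))).items = [] := rfl
  rw [hemp, List.nil_append, List.map_map, List.map_map]
  congr 1
  apply List.map_eq_map_iff.mpr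
  intro sel _
  dsimp only [Function.comp]
  congr 2
  congr 1
  rw [pv_casc_items, List.map_map]
  apply List.map_eq_map_iff.mpr
  intro p hp
  dsimp only [Function.comp]
  congr 1
  cases hv : pvVals ((List.filter (fun t => t.1 == sel) (pvItems reglas)).map (fun t => t.2)) p <;>
    simp [pvTofPair, pvTof]

lemma pv_B_eq_render (reglas : List (String × String)) :
    fusionar_reglas_alt reglas = pvRender reglas := by
  unfold fusionar_reglas_alt pvRender
  rw [pv_items_alt]
  dsimp only
  rw [PySem.List.dedup_eq_ofList]
  congr 1
  apply List.map_eq_map_iff.mpr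
  intro sel _
  rw [PySem.List.dedup_eq_ofList, List.map_map]
  have hprops : ((fun pv => pv.1) ∘ fun t : String × String × String => t.2)
      = fun t : String × String × String => t.2.1 := rfl
  rw [hprops]
  congr 2
  congr 1
  apply List.map_eq_map_iff.mpr
  intro p hp
  congr 1
  rw [pv_vals_triples]
  have hne := pv_vals_ne_nil (L := (pvItems reglas |>.filter (fun t => t.1 == sel)).map (fun t => t.2)) (p := p) (by rw [List.map_map, hprops]; exact hp)
  cases hv : pvVals ((pvItems reglas |>.filter (fun t => t.1 == sel)).map (fun t => t.2)) p with
  | nil => exact absurd hv hne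
  | cons v0 vs =>
    show (if ((v0 :: vs).filter pvImp).isEmpty then v0 :: vs else (v0 :: vs).filter pvImp).getLastD ""
      = pvTof (v0 :: vs)
    exact pv_ganador v0 vs

-- ===== VERDICT (by name: the statement is the Claim_ definition above) =====
theorem fusionar_reglas_spec : Claim_equal_fusionar_reglas := by
  intro reglas _
  unfold Spec_fusionar_reglas
  rw [pv_A_eq_render, pv_B_eq_render]
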